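-- pv_equiv track=rewrite | github.com/swordwielder/python3 | redditPracticeCodeSignal/mutateArray.py | mutateTheArray
-- ===== SOURCE A (Python) =====
-- def mutateTheArray(n, a):
--     b=[]
--     for i in range(len(a)):
--         total=0
--         if i!=0:
--             total+=a[i-1]
--         try:
--             total+=a[i+1]
--         except:
--             total+=0
--         total+=a[i]
--
--         b.append(total)
--     return b
-- ===== SOURCE B (Python) =====
-- def mutateTheArray(n, a):
--     # prefix-sum approach: b[i] is the window sum a[i-1]+a[i]+a[i+1]
--     # expressed as a difference of two prefix sums.
--     pref = [0]
--     for x in a: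
--         pref.append(pref[-1] + x)
--     m = len(a)
--     return [pref[min(m, i + 2)] - pref[max(0, i - 1)] for i in range(m)]
-- ===== Notes on version B (the rewrite author's own statement) =====
-- stated objective: alternative
-- what changed: Replaces A's per-index neighbor summation (branch on i!=0 plus try/except for i+1) with a two-stage prefix-sum algorithm: one pass builds the running prefix sums, then each output is the difference pref[min(m,i+2)] - pref[max(0,i-1)] of two prefix sums.
import Mathlib
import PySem

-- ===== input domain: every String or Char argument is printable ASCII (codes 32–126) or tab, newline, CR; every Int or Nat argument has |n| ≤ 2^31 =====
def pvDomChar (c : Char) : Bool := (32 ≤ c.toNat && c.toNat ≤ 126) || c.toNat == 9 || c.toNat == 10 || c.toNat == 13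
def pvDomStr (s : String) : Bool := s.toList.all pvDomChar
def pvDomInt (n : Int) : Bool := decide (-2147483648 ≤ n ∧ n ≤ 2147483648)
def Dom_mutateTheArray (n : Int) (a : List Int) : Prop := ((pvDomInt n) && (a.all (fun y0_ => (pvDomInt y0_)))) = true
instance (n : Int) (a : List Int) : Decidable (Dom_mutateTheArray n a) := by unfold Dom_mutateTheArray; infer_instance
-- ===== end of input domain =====

-- B computes each window sum a[i-1]+a[i]+a[i+1] as a difference of two prefix sums built in a first pass (alternative algorithm).

-- ===== PORT A =====
-- A's loop body: total = 0; if i != 0: total += a[i-1]; try: total += a[i+1] except: total += 0; total += a[i]; b.append(total)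
def mutateTheArray (n : Int) (a : List Int) : List Int :=
  List.foldl
    (fun b i =>
      let total : Int := 0
      let total := if i ≠ 0 then total + PySem.List.pyGetD a (i - 1) 0 else total
      let total := match PySem.List.pyGet? a (i + 1) with
        | some v => total + v
        | none => total + 0
      let total := total + PySem.List.pyGetD a i 0
      b ++ [total])
    [] (PySem.List.pyRange 0 a.length 1)

-- ===== PORT B =====
-- pref = [0]; for x in a: pref.append(pref[-1] + x); m = len(a);
-- [pref[min(m, i+2)] - pref[max(0, i-1)] for i in range(m)]
def mutateTheArray_alt (n : Int) (a : List Int) : List Int :=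
  let pref := a.foldl (fun p x => p ++ [PySem.List.pyGetD p (-1) 0 + x]) [0]
  let m : Int := PySem.List.len a
  (PySem.List.pyRange 0 m 1).map (fun i =>
    PySem.List.pyGetD pref (min m (i + 2)) 0 - PySem.List.pyGetD pref (max 0 (i - 1)) 0)

-- ===== PRECONDITION & SPEC =====
def Spec_mutateTheArray (n : Int) (a : List Int) (out : List Int) : Prop := out = mutateTheArray_alt n a
instance (n : Int) (a : List Int) (out : List Int) : Decidable (Spec_mutateTheArray n a out) := by unfold Spec_mutateTheArray; infer_instance

-- ===== CLAIM (what is proved, stated in full; the proofs are below) =====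
def Claim_equal_mutateTheArray : Prop := ∀ (n : Int) (a : List Int), Dom_mutateTheArray n a → Spec_mutateTheArray n a (mutateTheArray n a)

-- ===== LEMMAS AND PROOFS =====

-- A's loop, as a map over the index range
lemma mutateTheArray_eq_map (n : Int) (a : List Int) :
    mutateTheArray n a = (PySem.List.pyRange 0 a.length 1).map (fun i =>
      (if i ≠ 0 then PySem.List.pyGetD a (i - 1) 0 else 0) +
      (match PySem.List.pyGet? a (i + 1) with | some v => v | none => 0) +
      PySem.List.pyGetD a i 0) := by
  unfold mutateTheArray
  rw [PySem.List.foldl_append_singleton_eq_map]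
  apply List.map_congr_left
  intro i _
  split <;> split <;> ring_nf

-- running sums of l starting from s (the values B's first pass appends)
def partials (s : Int) : List Int → List Int
  | [] => []
  | x :: xs => (s + x) :: partials (s + x) xs

lemma length_partials (s : Int) (l : List Int) : (partials s l).length = l.length := by
  induction l generalizing s with
  | nil => rfl
  | cons x xs ih => simp [partials, ih]

lemma foldl_step_eq (l : List Int) (p : List Int) (hp : p ≠ []) :
    l.foldl (fun p x => p ++ [PySem.List.pyGetD p (-1) 0 + x]) p
      = p ++ partials (p.getLast hp) l := by
  induction l generalizing p with
  | nil => simp [partials]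
  | cons x xs ih =>
    simp only [List.foldl_cons]
    rw [PySem.List.pyGetD_neg_one p 0 hp]
    rw [ih (p ++ [p.getLast hp + x]) (by simp)]
    have hlast : (p ++ [p.getLast hp + x]).getLast (by simp) = p.getLast hp + x := by
      simp
    rw [hlast, partials, List.append_assoc]
    rfl

lemma partials_getElem (s : Int) (l : List Int) (j : Nat) (h : j < l.length) :
    (partials s l)[j]'(by rw [length_partials]; exact h) = s + (l.take (j + 1)).sum := by
  induction l generalizing s j with
  | nil => simp at h
  | cons x xs ih =>
    cases j with
    | zero => simp [partials]
    | succ m =>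
      simp only [partials, List.getElem_cons_succ]
      rw [ih (s + x) m (by simpa using h)]
      simp [List.take_succ_cons]
      ring

-- pref[j] = sum of the first j elements, for 0 ≤ j ≤ len a
lemma pref_getD (a : List Int) (j : Nat) (hj : j ≤ a.length) :
    PySem.List.pyGetD (a.foldl (fun p x => p ++ [PySem.List.pyGetD p (-1) 0 + x]) [0]) (j : Int) 0
      = (a.take j).sum := by
  rw [foldl_step_eq a [0] (by simp)]
  rw [PySem.List.pyGetD_natCast]
  simp only [List.getLast_singleton]
  cases j with
  | zero => simp
  | succ m =>
    have hm : m < a.length := by omega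
    rw [List.getD_eq_getElem?_getD, List.getElem?_eq_getElem (by simp [length_partials]; omega)]
    simp only [Option.getD_some, List.singleton_append, List.getElem_cons_succ]
    rw [partials_getElem 0 a m hm]
    ring

lemma pyGetD_idx (a : List Int) (j : Nat) (h : j < a.length) :
    PySem.List.pyGetD a ((j : Nat) : Int) 0 = a[j] := by
  rw [PySem.List.pyGetD_natCast, List.getD_eq_getElem?_getD, List.getElem?_eq_getElem h]
  rfl

theorem mutateTheArray_spec : Claim_equal_mutateTheArray := by
  intro n a _
  show mutateTheArray n a = mutateTheArray_alt n a
  rw [mutateTheArray_eq_map]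
  unfold mutateTheArray_alt
  simp only [PySem.List.len_eq]
  apply List.ext_getElem
  · simp
  · intro k h1 h2
    have hk : k < a.length := by
      simpa [PySem.List.length_pyRange_one] using h1
    rw [List.getElem_map, List.getElem_map, PySem.List.getElem_pyRange_one]
    simp only [zero_add]
    have hmin : min (a.length : Int) ((k : Int) + 2) = ((min a.length (k + 2) : Nat) : Int) := by
      push_cast; omega
    have hmax : max 0 ((k : Int) - 1) = ((k - 1 : Nat) : Int) := by
      cases k <;> push_cast <;> omega
    rw [hmin, hmax, pref_getD a _ (by omega), pref_getD a _ (by omega)]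
    by_cases hk0 : k = 0
    · subst hk0
      rw [if_neg (by simp : ¬ (((0 : Nat) : Int)) ≠ 0)]
      rw [show (((0 : Nat) : Int) + 1) = ((1 : Nat) : Int) by norm_num,
        PySem.List.pyGet?_natCast, pyGetD_idx a 0 hk]
      by_cases h1m : 1 < a.length
      · rw [List.getElem?_eq_getElem h1m,
          show min a.length (0 + 2) = 2 by omega,
          List.sum_take_succ a 1 h1m, List.sum_take_succ a 0 (by omega)]
        simp
        ring
      · rw [List.getElem?_eq_none (by omega),
          show min a.length (0 + 2) = 1 by omega,
          List.sum_take_succ a 0 (by omega)]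
        simp
    · have hk1 : 1 ≤ k := by omega
      rw [if_pos (by exact_mod_cast Int.natCast_ne_zero.mpr hk0)]
      have hsub : ((k : Int) - 1) = ((k - 1 : Nat) : Int) := by push_cast [hk1]; ring
      have hadd : ((k : Int) + 1) = ((k + 1 : Nat) : Int) := by push_cast; ring
      rw [hsub, hadd, PySem.List.pyGet?_natCast,
        pyGetD_idx a (k - 1) (by omega), pyGetD_idx a k hk]
      have hsk : (a.take k).sum = (a.take (k - 1)).sum + a[k - 1] := by
        have h := List.sum_take_succ a (k - 1) (by omega)
        simpa [show k - 1 + 1 = k by omega] using h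
      by_cases hlast : k + 1 < a.length
      · rw [List.getElem?_eq_getElem hlast,
          show min a.length (k + 2) = k + 2 by omega,
          show k + 2 = (k + 1) + 1 by ring,
          List.sum_take_succ a (k + 1) hlast, List.sum_take_succ a k hk, hsk]
        have hm : (match some (a[k + 1]'hlast) with | some v => v | none => (0 : Int)) = a[k + 1] := rfl
        rw [hm]
        ring
      · rw [List.getElem?_eq_none (by omega),
          show min a.length (k + 2) = k + 1 by omega,
          List.sum_take_succ a k hk, hsk]
        have hm : (match (none : Option Int) with | some v => v | none => (0 : Int)) = 0 := rfl
        rw [hm]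
        ring
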